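-- pv_equiv track=rewrite | github.com/eshun4/FundamentalCodingInterviewPrep | 07/consecetive_letters.py | count_consecjutive_letters_vowel_arr
-- ===== SOURCE A (Python) =====
-- def count_consecjutive_letters_vowel_arr(str_inp):
--     """This function counts the number of consecutive letters in the string input provided."""
--     # Create a variable to store all the vowels
--     vowels = "aeiouAEIOU"
--     # Create a variable to store the count of consecutive letters
--     consecutive_vowel_letters = []
--     # Create another variable to keep track of the previous letter
--     prev_letter = None
--     # Iterate through each letter in the string
--     for lett in str_inp:
--         if prev_letter == lett and prev_letter in vowels and lett in vowels:
--              consecutive_vowel_letters.append(prev_letter + lett)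
--         prev_letter = lett
--     # Return the consecutive letter count
--     return consecutive_vowel_letters
-- ===== SOURCE B (Python) =====
-- def count_consecjutive_letters_vowel_arr(str_inp):
--     """Run-length-encoding re-implementation: compress the string into (char, run_length)
--     runs, then emit run_length-1 doubled pairs for each vowel run."""
--     runs = []
--     i, n = 0, len(str_inp)
--     while i < n:
--         j = i
--         while j < n and str_inp[j] == str_inp[i]:
--             j += 1
--         runs.append((str_inp[i], j - i))
--         i = j
--     out = []
--     for ch, k in runs:
--         if ch in "aeiouAEIOU":
--             out.extend([ch + ch] * (k - 1))
--     return out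
-- ===== Notes on version B (the rewrite author's own statement) =====
-- stated objective: alternative
-- what changed: Replaced the single stateful prev_letter scan by a two-stage run-length-encoding algorithm: first compress the string into (char, run_length) runs, then emit run_length-1 doubled pairs for each vowel run.
import Mathlib
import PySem

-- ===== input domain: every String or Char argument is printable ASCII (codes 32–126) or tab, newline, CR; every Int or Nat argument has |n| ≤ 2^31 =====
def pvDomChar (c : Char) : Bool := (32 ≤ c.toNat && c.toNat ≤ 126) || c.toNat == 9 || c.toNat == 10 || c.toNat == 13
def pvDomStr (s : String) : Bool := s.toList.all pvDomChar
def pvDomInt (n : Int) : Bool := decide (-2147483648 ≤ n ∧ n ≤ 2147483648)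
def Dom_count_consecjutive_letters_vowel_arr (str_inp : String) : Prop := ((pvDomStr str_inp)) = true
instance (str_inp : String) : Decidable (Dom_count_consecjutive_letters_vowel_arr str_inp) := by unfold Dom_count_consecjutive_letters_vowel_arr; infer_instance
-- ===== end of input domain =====

-- B replaces A's stateful prev_letter scan by a two-stage run-length-encoding algorithm
-- (compress into runs, then emit run_length-1 doubled pairs per vowel run); same return value.


-- ===== PORT A =====
-- `prev_letter in vowels` for a single char = char membership; when prev_letter is None
-- the `prev_letter == lett` conjunct is already False (Python short-circuits), ported by
-- matching on the option.
def pvALoop : List Char → Option Char → List String → List String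
  | [], _, acc => acc
  | c :: rest, prev, acc =>
    let acc' :=
      match prev with
      | none => acc
      | some p =>
        if p == c && ("aeiouAEIOU".toList).contains p && ("aeiouAEIOU".toList).contains c then
          acc ++ [String.mk [p, c]]
        else acc
    pvALoop rest (some c) acc'

def count_consecjutive_letters_vowel_arr (str_inp : String) : List String :=
  pvALoop str_inp.toList none []

-- ===== PORT B =====
-- stage 1 of Source B: the while/while run-length compression; the inner
-- `while j < n and str_inp[j] == str_inp[i]` is transcribed as takeWhile/dropWhile
-- on the remaining characters (exact: it counts the maximal block equal to the head).
def pvRuns : List Char → List (Char × Nat)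
  | [] => []
  | c :: rest =>
    (c, 1 + (rest.takeWhile (· == c)).length) :: pvRuns (rest.dropWhile (· == c))
termination_by l => l.length
decreasing_by
  simp only [List.length_cons]
  exact Nat.lt_succ_of_le (List.length_dropWhile_le _ _)

-- stage 2 of Source B: out.extend([ch+ch]*(k-1)) for each vowel run
def pvEmit (r : Char × Nat) : List String :=
  if ("aeiouAEIOU".toList).contains r.1 then List.replicate (r.2 - 1) (String.mk [r.1, r.1]) else []

def count_consecjutive_letters_vowel_arr_alt (str_inp : String) : List String :=
  (pvRuns str_inp.toList).flatMap pvEmit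

-- ===== PRECONDITION & SPEC =====
def Spec_count_consecjutive_letters_vowel_arr (str_inp : String) (out : List String) : Prop := out = count_consecjutive_letters_vowel_arr_alt str_inp
instance (str_inp : String) (out : List String) : Decidable (Spec_count_consecjutive_letters_vowel_arr str_inp out) := by unfold Spec_count_consecjutive_letters_vowel_arr; infer_instance

-- ===== CLAIM (what is proved, stated in full; the proofs are below) =====
def Claim_equal_count_consecjutive_letters_vowel_arr : Prop := ∀ (str_inp : String), Dom_count_consecjutive_letters_vowel_arr str_inp → Spec_count_consecjutive_letters_vowel_arr str_inp (count_consecjutive_letters_vowel_arr str_inp)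

-- ===== LEMMAS AND PROOFS =====
def pvPairOut (pr : Char × Char) : Option String :=
  if pr.1 == pr.2 && ("aeiouAEIOU".toList).contains pr.1 then some (String.mk [pr.1, pr.2]) else none

def pvPairs (l : List Char) : List String := (l.zip l.tail).filterMap pvPairOut

-- A's loop collects exactly the adjacent equal-vowel pairs, in order.
theorem pvALoop_eq (l : List Char) : ∀ (p : Char) (acc : List String),
    pvALoop l (some p) acc = acc ++ ((p :: l).zip l).filterMap pvPairOut := by
  induction l with
  | nil => intro p acc; simp [pvALoop]
  | cons c rest ih =>
    intro p acc
    simp only [pvALoop, List.zip_cons_cons, List.filterMap_cons]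
    by_cases h : p = c
    · subst h
      by_cases hv : (p = 'a' ∨ p = 'e' ∨ p = 'i' ∨ p = 'o' ∨ p = 'u' ∨ p = 'A' ∨ p = 'E' ∨ p = 'I' ∨ p = 'O' ∨ p = 'U')
      · simp [ih, pvPairOut, hv]
      · simp [ih, pvPairOut, hv]
    · have hne : (p == c) = false := by simp [h]
      simp [ih, pvPairOut, hne]

-- pairwise scan of (c :: run ++ d) where the run is all c's and d does not start with c
theorem pvPairs_run (c : Char) (t d : List Char) (ht : ∀ x ∈ t, x = c)
    (hd : ∀ h, d.head? = some h → h ≠ c) :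
    pvPairs (c :: (t ++ d)) =
      (if ("aeiouAEIOU".toList).contains c then
        List.replicate t.length (String.mk [c, c]) else []) ++ pvPairs d := by
  induction t with
  | nil =>
    simp only [List.nil_append, List.length_nil, List.replicate_zero]
    cases d with
    | nil => simp [pvPairs]
    | cons h d' =>
      have hne : h ≠ c := hd h rfl
      have hbe : (c == h) = false := by simp [Ne.symm hne]
      have : pvPairOut (c, h) = none := by simp [pvPairOut, hbe]
      simp [pvPairs, this]
  | cons x t' ih =>
    have hx : x = c := ht x (by simp)
    subst hx
    have ih' := ih (fun y hy => ht y (by simp [hy]))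
    simp only [List.cons_append, List.length_cons]
    have hstep : pvPairs (x :: x :: (t' ++ d)) =
        (pvPairOut (x, x)).toList ++ pvPairs (x :: (t' ++ d)) := by
      simp [pvPairs, List.filterMap_cons]
      cases pvPairOut (x, x) <;> simp
    rw [hstep, ih']
    by_cases hv : (x = 'a' ∨ x = 'e' ∨ x = 'i' ∨ x = 'o' ∨ x = 'u' ∨ x = 'A' ∨ x = 'E' ∨ x = 'I' ∨ x = 'O' ∨ x = 'U')
    · simp [pvPairOut, hv, List.replicate_succ]
    · simp [pvPairOut, hv]

theorem pvPairs_runs : ∀ l : List Char, pvPairs l = (pvRuns l).flatMap pvEmit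
  | [] => by simp [pvPairs, pvRuns]
  | c :: rest => by
    have ht : ∀ x ∈ rest.takeWhile (· == c), x = c := by
      intro x hx
      have := List.mem_takeWhile_imp hx
      simpa using this
    have hd : ∀ h, (rest.dropWhile (· == c)).head? = some h → h ≠ c := by
      intro h hh
      have := List.head?_dropWhile_not (· == c) rest
      rw [hh] at this
      simpa using this
    have hsplit : rest = rest.takeWhile (· == c) ++ rest.dropWhile (· == c) :=
      (List.takeWhile_append_dropWhile).symm
    have ihrec := pvPairs_runs (rest.dropWhile (· == c))
    calc pvPairs (c :: rest)
        = pvPairs (c :: (rest.takeWhile (· == c) ++ rest.dropWhile (· == c))) := by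
          rw [← hsplit]
      _ = (if ("aeiouAEIOU".toList).contains c then
            List.replicate (rest.takeWhile (· == c)).length (String.mk [c, c]) else [])
            ++ pvPairs (rest.dropWhile (· == c)) := pvPairs_run c _ _ ht hd
      _ = (pvRuns (c :: rest)).flatMap pvEmit := by
          rw [ihrec]
          simp only [pvRuns, List.flatMap_cons, pvEmit, Nat.add_sub_cancel_left]
termination_by l => l.length
decreasing_by
  simp only [List.length_cons]
  exact Nat.lt_succ_of_le (List.length_dropWhile_le _ _)

-- ===== VERDICT (by name: the statement is the Claim_ definition above) =====
theorem count_consecjutive_letters_vowel_arr_spec : Claim_equal_count_consecjutive_letters_vowel_arr := by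
  intro s _
  unfold Spec_count_consecjutive_letters_vowel_arr count_consecjutive_letters_vowel_arr count_consecjutive_letters_vowel_arr_alt
  rw [← pvPairs_runs]
  cases h : s.toList with
  | nil => simp [pvALoop, pvPairs]
  | cons c rest => simp [pvALoop, pvALoop_eq, pvPairs]
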